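-- pv_equiv track=rewrite | github.com/asherkobin/CodeChallenges | slow_sums.py | get_total_time
-- ===== SOURCE A (Python) =====
-- def get_total_time(arr):
--   total_time = 0
--   arr.sort(reverse=True)
--
--   while True:
--     if len(arr) == 1:
--       return total_time
--
--     sum = arr[0] + arr[1]
--
--     total_time += sum
--
--     arr = [sum, *arr[2:]]
-- ===== SOURCE B (Python) =====
-- def get_total_time(arr):
--   # one pass over the sorted-descending list, accumulating a running prefix sum
--   s = sorted(arr, reverse=True)
--   prefix = s[0]
--   total = 0
--   for x in s[1:]:
--     prefix += x
--     total += prefix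
--   return total
-- ===== Notes on version B (the rewrite author's own statement) =====
-- stated objective: faster
-- what changed: Replaces the quadratic loop that rebuilds the list after each pairwise combine with a single pass over the sorted list accumulating a running prefix sum.
import Mathlib
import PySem

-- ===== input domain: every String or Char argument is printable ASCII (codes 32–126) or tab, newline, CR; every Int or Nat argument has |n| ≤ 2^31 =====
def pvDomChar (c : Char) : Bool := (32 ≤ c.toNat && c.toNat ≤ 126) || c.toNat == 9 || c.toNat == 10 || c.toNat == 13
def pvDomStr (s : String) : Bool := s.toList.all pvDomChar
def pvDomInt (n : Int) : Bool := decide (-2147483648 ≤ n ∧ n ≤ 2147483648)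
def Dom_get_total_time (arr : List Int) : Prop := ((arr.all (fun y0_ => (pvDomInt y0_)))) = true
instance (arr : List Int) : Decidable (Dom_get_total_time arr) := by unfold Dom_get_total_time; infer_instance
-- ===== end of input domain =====

-- B replaces A's quadratic combine-and-rebuild loop with one prefix-sum pass over the
-- sorted list (asymptotically faster). A also sorts its argument in place; the claim is
-- about the RETURN value only.

-- ===== PORT A =====
-- A's while-loop: combine the first two elements, prepend the sum, repeat until one element.
def pvLoopA : List Int → Int → Int
  | [], total => total            -- unreachable under Pre_ (Python raises IndexError on [])
  | [_], total => total
  | a :: b :: rest, total => pvLoopA ((a + b) :: rest) (total + (a + b))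
termination_by l _ => l.length

def get_total_time (arr : List Int) : Int :=
  pvLoopA (PySem.List.sorted arr (fun x => x) true) 0

-- ===== PORT B =====
def get_total_time_alt (arr : List Int) : Int :=
  match PySem.List.sorted arr (fun x => x) true with
  | [] => 0                       -- unreachable under Pre_ (Python raises IndexError on [])
  | p :: rest =>
    (rest.foldl (fun (st : Int × Int) x => (st.1 + x, st.2 + (st.1 + x))) (p, 0)).2

-- ===== PRECONDITION & SPEC =====
-- Pre_ excludes the empty list, on which both A and B raise IndexError.
def Pre_get_total_time (arr : List Int) : Prop := arr ≠ []
instance (arr : List Int) : Decidable (Pre_get_total_time arr) := by unfold Pre_get_total_time; infer_instance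
def pvWitness_get_total_time : List Int := [3, 1, 2]

def Spec_get_total_time (arr : List Int) (out : Int) : Prop := out = get_total_time_alt arr
instance (arr : List Int) (out : Int) : Decidable (Spec_get_total_time arr out) := by unfold Spec_get_total_time; infer_instance

-- ===== CLAIM (what is proved, stated in full; the proofs are below) =====
def Claim_equal_get_total_time : Prop := ∀ (arr : List Int), Dom_get_total_time arr → Pre_get_total_time arr → Spec_get_total_time arr (get_total_time arr)

-- ===== LEMMAS AND PROOFS =====
-- A's loop on a :: rest equals B's one-pass fold started at (a, t).
theorem pvLoopA_eq_foldl (rest : List Int) : ∀ (a t : Int),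
    pvLoopA (a :: rest) t = (rest.foldl (fun (st : Int × Int) x => (st.1 + x, st.2 + (st.1 + x))) (a, t)).2 := by
  induction rest with
  | nil => intro a t; simp [pvLoopA]
  | cons b r ih =>
    intro a t
    simp only [pvLoopA, List.foldl]
    exact ih (a + b) (t + (a + b))

-- ===== VERDICT (by name: the statement is the Claim_ definition above) =====
theorem get_total_time_spec : Claim_equal_get_total_time := by
  intro arr _ hpre
  unfold Spec_get_total_time get_total_time get_total_time_alt
  have hne : PySem.List.sorted arr (fun x => x) true ≠ [] := by
    intro h
    exact hpre (List.Perm.eq_nil ((PySem.List.sorted_perm arr (fun x => x) true).symm.trans (h ▸ List.Perm.refl _)))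
  cases hs : PySem.List.sorted arr (fun x => x) true with
  | nil => exact absurd hs hne
  | cons p rest => exact pvLoopA_eq_foldl rest p 0
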